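-- pv_equiv track=rewrite | github.com/sebastiaangroot/kmaldetect | tools/gen_hooks.py | get_regunregfunctions
-- ===== SOURCE A (Python) =====
-- def get_defname(syscall, con_unistd):
-- 	for line in con_unistd:
-- 		if syscall in line:
-- 			return line[line.find('(') + 1:line.find(',')]
-- 	return 'ERROR'
--
-- def get_regunregfunctions(functpointers, con_unistd):
-- 	output = []
-- 	output.append('\n')
-- 	output.append('void reg_hooks(unsigned long **syscall_table)\n')
-- 	output.append('{\n')
-- 	for funct in functpointers:
-- 		refname = funct[funct.find('ref_'):funct.find(')')]
-- 		defname = get_defname(refname[4:], con_unistd)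
-- 		hookname = refname.replace('ref_', 'hook_')
--
-- 		output.append('\t%s = (void *)syscall_table[%s];\n' % (refname, defname))
-- 		output.append('\tsyscall_table[%s] = (unsigned long *)%s;\n' % (defname, hookname))
-- 	output.append('}\n')
-- 	output.append('\n')
-- 	output.append('void unreg_hooks(unsigned long **syscall_table)\n')
-- 	output.append('{\n')
-- 	for funct in functpointers:
-- 		refname = funct[funct.find('ref_'):funct.find(')')]
-- 		defname = get_defname(refname[4:], con_unistd)
-- 		output.append('\tsyscall_table[%s] = (unsigned long *)%s;\n' % (defname, refname))
-- 	output.append('}\n')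
-- 	return output
-- ===== SOURCE B (Python) =====
-- def get_regunregfunctions(functpointers, con_unistd):
--     # One fused pass over functpointers building both section bodies at once, with a
--     # memo dict so each distinct syscall name scans con_unistd at most once.
--     memo = {}
--     reg = []
--     unreg = []
--     for funct in functpointers:
--         refname = funct[funct.find('ref_'):funct.find(')')]
--         syscall = refname[4:]
--         if syscall in memo:
--             defname = memo[syscall]
--         else:
--             line = next((l for l in con_unistd if syscall in l), None)
--             defname = 'ERROR' if line is None else line[line.find('(') + 1:line.find(',')]
--             memo[syscall] = defname
--         reg.append('\t%s = (void *)syscall_table[%s];\n' % (refname, defname))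
--         reg.append('\tsyscall_table[%s] = (unsigned long *)%s;\n'
--                    % (defname, refname.replace('ref_', 'hook_')))
--         unreg.append('\tsyscall_table[%s] = (unsigned long *)%s;\n' % (defname, refname))
--     return (['\n', 'void reg_hooks(unsigned long **syscall_table)\n', '{\n'] + reg
--             + ['}\n', '\n', 'void unreg_hooks(unsigned long **syscall_table)\n', '{\n']
--             + unreg + ['}\n'])
-- ===== Notes on version B (the rewrite author's own statement) =====
-- stated objective: alternative
-- what changed: B replaces A's two independent loops (each re-slicing the name and re-scanning con_unistd per pointer) with one fused pass that builds both section bodies simultaneously and memoizes defname lookups in a dict keyed by syscall name, so con_unistd is scanned at most once per distinct name instead of twice per pointer.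
import Mathlib
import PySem

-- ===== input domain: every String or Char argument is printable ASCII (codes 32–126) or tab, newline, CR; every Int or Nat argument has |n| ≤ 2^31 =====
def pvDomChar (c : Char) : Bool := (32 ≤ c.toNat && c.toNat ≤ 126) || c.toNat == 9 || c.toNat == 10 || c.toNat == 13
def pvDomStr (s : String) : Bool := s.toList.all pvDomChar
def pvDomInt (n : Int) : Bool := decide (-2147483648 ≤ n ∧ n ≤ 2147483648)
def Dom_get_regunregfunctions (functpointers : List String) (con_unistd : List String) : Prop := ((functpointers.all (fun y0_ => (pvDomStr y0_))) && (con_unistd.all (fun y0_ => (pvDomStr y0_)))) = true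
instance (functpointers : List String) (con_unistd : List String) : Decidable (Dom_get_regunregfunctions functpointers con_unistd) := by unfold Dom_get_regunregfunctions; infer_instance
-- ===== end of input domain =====

-- B builds both hook-section bodies in one recursive back-to-front traversal (each name
-- resolved once) instead of A's two iterative loops; equal output (alternative decomposition).


-- ===== PORT A =====
-- get_defname: first line containing syscall, sliced between '(' and ','; 'ERROR' if none
def pvGetDefname (syscall : String) (con_unistd : List String) : String :=
  match con_unistd with
  | [] => "ERROR"
  | line :: rest =>
    if PySem.Str.isIn syscall line then
      PySem.Str.slice line (some (PySem.Str.find line "(" + 1)) (some (PySem.Str.find line ","))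
    else pvGetDefname syscall rest

def get_regunregfunctions (functpointers : List String) (con_unistd : List String) : List String :=
  let output : List String := []
  let output := output ++ ["\n"]
  let output := output ++ ["void reg_hooks(unsigned long **syscall_table)\n"]
  let output := output ++ ["{\n"]
  let output := functpointers.foldl (fun acc funct =>
    let refname := PySem.Str.slice funct (some (PySem.Str.find funct "ref_")) (some (PySem.Str.find funct ")"))
    let defname := pvGetDefname (PySem.Str.slice refname (some 4) none) con_unistd
    let hookname := PySem.Str.replace refname "ref_" "hook_"
    acc ++ ["\t" ++ refname ++ " = (void *)syscall_table[" ++ defname ++ "];\n",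
            "\tsyscall_table[" ++ defname ++ "] = (unsigned long *)" ++ hookname ++ ";\n"]) output
  let output := output ++ ["}\n"]
  let output := output ++ ["\n"]
  let output := output ++ ["void unreg_hooks(unsigned long **syscall_table)\n"]
  let output := output ++ ["{\n"]
  let output := functpointers.foldl (fun acc funct =>
    let refname := PySem.Str.slice funct (some (PySem.Str.find funct "ref_")) (some (PySem.Str.find funct ")"))
    let defname := pvGetDefname (PySem.Str.slice refname (some 4) none) con_unistd
    acc ++ ["\tsyscall_table[" ++ defname ++ "] = (unsigned long *)" ++ refname ++ ";\n"]) output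
  output ++ ["}\n"]

-- ===== PORT B =====
-- fused single pass: memo dict caches defname per syscall; reg and unreg bodies built together
def pvDefOf (con_unistd : List String) (syscall : String) : String :=
  match con_unistd.find? (fun l => PySem.Str.isIn syscall l) with
  | none => "ERROR"
  | some line => PySem.Str.slice line (some (PySem.Str.find line "(" + 1)) (some (PySem.Str.find line ","))

def pvStep (con_unistd : List String)
    (st : PySem.Dict String String × List String × List String) (funct : String) :
    PySem.Dict String String × List String × List String :=
  let refname := PySem.Str.slice funct (some (PySem.Str.find funct "ref_")) (some (PySem.Str.find funct ")"))
  let syscall := PySem.Str.slice refname (some 4) none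
  let (memo, defname) :=
    match st.1.get? syscall with
    | some d => (st.1, d)
    | none => (st.1.insert syscall (pvDefOf con_unistd syscall), pvDefOf con_unistd syscall)
  (memo,
   st.2.1 ++ ["\t" ++ refname ++ " = (void *)syscall_table[" ++ defname ++ "];\n",
              "\tsyscall_table[" ++ defname ++ "] = (unsigned long *)" ++ PySem.Str.replace refname "ref_" "hook_" ++ ";\n"],
   st.2.2 ++ ["\tsyscall_table[" ++ defname ++ "] = (unsigned long *)" ++ refname ++ ";\n"])

def get_regunregfunctions_alt (functpointers : List String) (con_unistd : List String) : List String :=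
  let st := functpointers.foldl (pvStep con_unistd) (PySem.Dict.empty, [], [])
  ["\n", "void reg_hooks(unsigned long **syscall_table)\n", "{\n"] ++ st.2.1
    ++ ["}\n", "\n", "void unreg_hooks(unsigned long **syscall_table)\n", "{\n"]
    ++ st.2.2 ++ ["}\n"]

-- ===== PRECONDITION & SPEC =====
def Spec_get_regunregfunctions (functpointers : List String) (con_unistd : List String) (out : List String) : Prop := out = get_regunregfunctions_alt functpointers con_unistd
instance (functpointers : List String) (con_unistd : List String) (out : List String) : Decidable (Spec_get_regunregfunctions functpointers con_unistd out) := by unfold Spec_get_regunregfunctions; infer_instance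

-- ===== CLAIM (what is proved, stated in full; the proofs are below) =====
def Claim_equal_get_regunregfunctions : Prop := ∀ (functpointers : List String) (con_unistd : List String), Dom_get_regunregfunctions functpointers con_unistd → Spec_get_regunregfunctions functpointers con_unistd (get_regunregfunctions functpointers con_unistd)

-- ===== LEMMAS AND PROOFS =====
-- per-pointer line builders (proof abbreviations)
def pvRefOf (funct : String) : String :=
  PySem.Str.slice funct (some (PySem.Str.find funct "ref_")) (some (PySem.Str.find funct ")"))
def pvRegLines (cu : List String) (funct : String) : List String :=
  let refname := pvRefOf funct
  let defname := pvDefOf cu (PySem.Str.slice refname (some 4) none)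
  ["\t" ++ refname ++ " = (void *)syscall_table[" ++ defname ++ "];\n",
   "\tsyscall_table[" ++ defname ++ "] = (unsigned long *)" ++ PySem.Str.replace refname "ref_" "hook_" ++ ";\n"]
def pvUnregLine (cu : List String) (funct : String) : String :=
  let refname := pvRefOf funct
  "\tsyscall_table[" ++ pvDefOf cu (PySem.Str.slice refname (some 4) none) ++ "] = (unsigned long *)" ++ refname ++ ";\n"

-- A's loop-scan get_defname equals the find?-based pvDefOf
theorem pvGetDefname_eq (syscall : String) (cu : List String) :
    pvGetDefname syscall cu = pvDefOf cu syscall := by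
  induction cu with
  | nil => rfl
  | cons line rest ih =>
    cases h : PySem.Chars.isIn syscall.toList line.toList with
    | true => simp [pvGetDefname, pvDefOf, List.find?, h]
    | false => simp only [pvGetDefname, pvDefOf, List.find?, PySem.Str.isIn, h] at ih ⊢; simpa [h] using ih

-- A's two folds characterised through the line builders
theorem pvAfold_reg (cu : List String) (fps : List String) : ∀ (acc : List String),
    fps.foldl (fun acc funct =>
      let refname := PySem.Str.slice funct (some (PySem.Str.find funct "ref_")) (some (PySem.Str.find funct ")"))
      let defname := pvGetDefname (PySem.Str.slice refname (some 4) none) cu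
      let hookname := PySem.Str.replace refname "ref_" "hook_"
      acc ++ ["\t" ++ refname ++ " = (void *)syscall_table[" ++ defname ++ "];\n",
              "\tsyscall_table[" ++ defname ++ "] = (unsigned long *)" ++ hookname ++ ";\n"]) acc
      = acc ++ fps.flatMap (pvRegLines cu) := by
  induction fps with
  | nil => intro acc; simp
  | cons f rest ih =>
    intro acc
    rw [List.foldl_cons, ih]
    simp [pvRegLines, pvRefOf, pvGetDefname_eq]

theorem pvAfold_unreg (cu : List String) (fps : List String) : ∀ (acc : List String),
    fps.foldl (fun acc funct =>
      let refname := PySem.Str.slice funct (some (PySem.Str.find funct "ref_")) (some (PySem.Str.find funct ")"))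
      let defname := pvGetDefname (PySem.Str.slice refname (some 4) none) cu
      acc ++ ["\tsyscall_table[" ++ defname ++ "] = (unsigned long *)" ++ refname ++ ";\n"]) acc
      = acc ++ fps.map (pvUnregLine cu) := by
  induction fps with
  | nil => intro acc; simp
  | cons f rest ih =>
    intro acc
    rw [List.foldl_cons, ih]
    simp [pvUnregLine, pvRefOf, pvGetDefname_eq]

-- the memo only ever holds correct defnames
def pvGood (cu : List String) (memo : PySem.Dict String String) : Prop :=
  ∀ k v, memo.get? k = some v → v = pvDefOf cu k

theorem pvLoop (cu : List String) (fps : List String) :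
    ∀ (memo : PySem.Dict String String) (reg unreg : List String), pvGood cu memo →
      (fps.foldl (pvStep cu) (memo, reg, unreg)).2 =
        (reg ++ fps.flatMap (pvRegLines cu), unreg ++ fps.map (pvUnregLine cu)) := by
  induction fps with
  | nil => intro memo reg unreg _; simp
  | cons f rest ih =>
    intro memo reg unreg hg
    simp only [List.foldl_cons, List.flatMap_cons, List.map_cons]
    cases hget : memo.get? (PySem.Str.slice (pvRefOf f) (some 4) none) with
    | some d =>
      have hstep : pvStep cu (memo, reg, unreg) f =
          (memo, reg ++ pvRegLines cu f, unreg ++ [pvUnregLine cu f]) := by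
        simp only [pvStep]
        rw [show memo.get? (PySem.Str.slice
              (PySem.Str.slice f (some (PySem.Str.find f "ref_")) (some (PySem.Str.find f ")")))
              (some 4) none) = some d from hget]
        simp only [pvRegLines, pvUnregLine, pvRefOf, hg _ _ hget]
      rw [hstep, ih _ _ _ hg]
      simp
    | none =>
      have hstep : pvStep cu (memo, reg, unreg) f =
          (memo.insert (PySem.Str.slice (pvRefOf f) (some 4) none)
             (pvDefOf cu (PySem.Str.slice (pvRefOf f) (some 4) none)),
           reg ++ pvRegLines cu f, unreg ++ [pvUnregLine cu f]) := by
        simp only [pvStep]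
        rw [show memo.get? (PySem.Str.slice
              (PySem.Str.slice f (some (PySem.Str.find f "ref_")) (some (PySem.Str.find f ")")))
              (some 4) none) = none from hget]
        simp only [pvRegLines, pvUnregLine, pvRefOf]
      rw [hstep, ih _ _ _ ?_]
      · simp
      · intro k v hk
        rw [PySem.Dict.get?_insert] at hk
        split at hk
        · cases hk; simp [*]
        · exact hg _ _ hk

-- ===== VERDICT (by name: the statement is the Claim_ definition above) =====
theorem get_regunregfunctions_spec : Claim_equal_get_regunregfunctions := by
  intro fp cu _
  show get_regunregfunctions fp cu = get_regunregfunctions_alt fp cu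
  simp only [get_regunregfunctions, get_regunregfunctions_alt]
  rw [pvAfold_reg, pvAfold_unreg,
    pvLoop cu fp PySem.Dict.empty [] [] (by intro k v h; simp [PySem.Dict.get?_empty] at h)]
  simp
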